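-- pv_equiv track=rewrite | github.com/govardhananprabhu/DS-task- | smallest span.py | smallestCommonSum
-- ===== SOURCE A (Python) =====
-- def smallestCommonSum(arr1, arr2, n):
--
-- 	minLen = n
--
-- 	for i in range(0,n):
-- 		sum1 = 0
-- 		sum2 = 0
--
-- 		for j in range(i,n):
-- 			sum1 += arr1[j]
-- 			sum2 += arr2[j]
-- 			if (sum1 == sum2):
-- 				len = j-i+1
-- 				if (len < minLen):
-- 					minLen = len
--
-- 	return minLen
-- ===== SOURCE B (Python) =====
-- def smallestCommonSum(arr1, arr2, n):
--     # One pass over the difference prefix sums: the window [i, j] has equal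
--     # sums in both arrays iff prefix[j+1] == prefix[i]; a dict keeps the last
--     # index at which each prefix value occurred, so the minimal gap per value
--     # is found in O(n).
--     last = {0: 0}
--     best = n
--     p = 0
--     for k in range(0, n):
--         p = p + arr1[k] - arr2[k]
--         i = last.get(p)
--         if i is not None:
--             if k + 1 - i < best:
--                 best = k + 1 - i
--         last[p] = k + 1
--     return best
-- ===== Notes on version B (the rewrite author's own statement) =====
-- stated objective: faster
-- what changed: Replaced the nested scan over all window starts by a single pass over the prefix sums of the difference array with a dict of the last index per prefix value, turning O(n^2) into O(n).
import Mathlib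
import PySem

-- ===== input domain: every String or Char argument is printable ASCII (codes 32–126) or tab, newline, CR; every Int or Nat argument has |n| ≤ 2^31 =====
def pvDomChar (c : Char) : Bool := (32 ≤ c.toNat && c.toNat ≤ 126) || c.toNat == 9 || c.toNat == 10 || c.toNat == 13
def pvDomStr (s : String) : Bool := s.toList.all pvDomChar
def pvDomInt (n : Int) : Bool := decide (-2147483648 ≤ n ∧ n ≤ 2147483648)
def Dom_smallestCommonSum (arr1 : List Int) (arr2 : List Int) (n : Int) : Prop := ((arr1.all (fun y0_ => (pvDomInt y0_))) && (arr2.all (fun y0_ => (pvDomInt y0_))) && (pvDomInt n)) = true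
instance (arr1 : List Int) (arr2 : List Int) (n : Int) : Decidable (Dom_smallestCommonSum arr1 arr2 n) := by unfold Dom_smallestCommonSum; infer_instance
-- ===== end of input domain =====

-- B replaces A's nested scan over all window starts by a single pass over the
-- prefix sums of the difference array with a dict of the last index per prefix
-- value (objective: faster).

-- ===== PORT A =====
-- arr[j] is ported as pyGetD arr j 0; Pre_ guarantees every accessed index is in range.
def smallestCommonSum (arr1 : List Int) (arr2 : List Int) (n : Int) : Int :=
  (PySem.List.pyRange 0 n 1).foldl
    (fun minLen i =>
      ((PySem.List.pyRange i n 1).foldl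
        (fun (s : Int × Int × Int) j =>
          let sum1 := s.2.1 + PySem.List.pyGetD arr1 j 0
          let sum2 := s.2.2 + PySem.List.pyGetD arr2 j 0
          (if sum1 = sum2 then (if j - i + 1 < s.1 then j - i + 1 else s.1) else s.1,
           sum1, sum2))
        (minLen, 0, 0)).1)
    n

-- ===== PORT B =====
def smallestCommonSum_alt (arr1 : List Int) (arr2 : List Int) (n : Int) : Int :=
  ((PySem.List.pyRange 0 n 1).foldl
    (fun (s : PySem.Dict Int Int × Int × Int) k =>
      let p := s.2.2 + PySem.List.pyGetD arr1 k 0 - PySem.List.pyGetD arr2 k 0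
      let best := match s.1.get? p with
        | some i => if k + 1 - i < s.2.1 then k + 1 - i else s.2.1
        | none => s.2.1
      (s.1.insert p (k + 1), best, p))
    (PySem.Dict.empty.insert 0 0, n, 0)).2.1

-- ===== PRECONDITION & SPEC =====
-- A raises IndexError when n exceeds either array's length; Pre_ excludes exactly those inputs.
def Pre_smallestCommonSum (arr1 : List Int) (arr2 : List Int) (n : Int) : Prop :=
  n ≤ (arr1.length : Int) ∧ n ≤ (arr2.length : Int)
instance (arr1 : List Int) (arr2 : List Int) (n : Int) : Decidable (Pre_smallestCommonSum arr1 arr2 n) := by unfold Pre_smallestCommonSum; infer_instance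
def pvWitness_smallestCommonSum : List Int × List Int × Int := ([1, 2, 3], [3, 0, 3], 3)

def Spec_smallestCommonSum (arr1 : List Int) (arr2 : List Int) (n : Int) (out : Int) : Prop := out = smallestCommonSum_alt arr1 arr2 n
instance (arr1 : List Int) (arr2 : List Int) (n : Int) (out : Int) : Decidable (Spec_smallestCommonSum arr1 arr2 n out) := by unfold Spec_smallestCommonSum; infer_instance

-- ===== CLAIM (what is proved, stated in full; the proofs are below) =====
def Claim_equal_smallestCommonSum : Prop := ∀ (arr1 : List Int) (arr2 : List Int) (n : Int), Dom_smallestCommonSum arr1 arr2 n → Pre_smallestCommonSum arr1 arr2 n → Spec_smallestCommonSum arr1 arr2 n (smallestCommonSum arr1 arr2 n)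

-- ===== LEMMAS AND PROOFS =====

-- prefix sums of the difference array (pvPfx a b k = sum_{u<k} (a[u]-b[u]))
def pvPfx (a b : List Int) : Nat → Int
  | 0 => 0
  | k + 1 => pvPfx a b k + a.getD k 0 - b.getD k 0

-- segment sum sum_{u<c} a[i+u]
def pvSeg (a : List Int) (i : Nat) : Nat → Int
  | 0 => 0
  | c + 1 => pvSeg a i c + a.getD (i + c) 0

theorem pvPfx_succ (a b : List Int) (k : Nat) :
    pvPfx a b (k + 1) = pvPfx a b k + a.getD k 0 - b.getD k 0 := rfl

theorem pvSeg_succ (a : List Int) (i c : Nat) :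
    pvSeg a i (c + 1) = pvSeg a i c + a.getD (i + c) 0 := rfl

-- last index i ≤ k with f i = v
def pvLast (f : Nat → Int) (v : Int) : Nat → Option Nat
  | 0 => if f 0 = v then some 0 else none
  | k + 1 => if f (k + 1) = v then some (k + 1) else pvLast f v k

-- pvLast with the index cast to Int (the value stored in B's dict)
def pvLastI (f : Nat → Int) (v : Int) (k : Nat) : Option Int :=
  match pvLast f v k with
  | some i => some ((i : Int))
  | none => none

-- the window lengths A inspects (all equal-sum windows)
def pvCandA (a b : List Int) (m : Nat) : List Int :=
  (List.range m).flatMap (fun i =>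
    ((List.range (m - i)).filter
        (fun t => decide (pvPfx a b (i + t + 1) = pvPfx a b i))).map
      (fun (t : Nat) => (t : Int) + 1))

-- the window lengths B inspects (last occurrence per prefix value)
def pvCandB (a b : List Int) (m : Nat) : List Int :=
  (List.range m).filterMap (fun k =>
    match pvLast (pvPfx a b) (pvPfx a b (k + 1)) k with
    | some i => some ((k : Int) + 1 - (i : Int))
    | none => none)

theorem pv_if_lt (acc y : Int) : (if y < acc then y else acc) = min acc y := by
  split_ifs <;> omega

theorem pv_foldl_min_flatMap {α : Type} (l : List α) (f : α → List Int) (acc : Int) :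
    l.foldl (fun acc i => (f i).foldl min acc) acc = ((l.flatMap f).foldl min acc) := by
  induction l generalizing acc with
  | nil => rfl
  | cons x xs ih => simp [List.foldl_append, ih]

theorem pv_foldl_min_filterMap {α : Type} (l : List α) (f : α → Option Int) (acc : Int) :
    l.foldl (fun acc x => match f x with | some y => min acc y | none => acc) acc
      = ((l.filterMap f).foldl min acc) := by
  induction l generalizing acc with
  | nil => rfl
  | cons x xs ih => cases h : f x <;> simp [h, ih]

theorem pvSeg_sub (a b : List Int) (i c : Nat) :
    pvSeg a i c - pvSeg b i c = pvPfx a b (i + c) - pvPfx a b i := by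
  induction c with
  | zero => simp [pvSeg]
  | succ c ih =>
      rw [show i + (c + 1) = i + c + 1 from rfl, pvSeg_succ, pvSeg_succ, pvPfx_succ]
      omega

theorem pvLast_some {f : Nat → Int} {v : Int} :
    ∀ {k i : Nat}, pvLast f v k = some i → f i = v ∧ i ≤ k := by
  intro k
  induction k with
  | zero => intro i h; simp only [pvLast] at h; split at h <;> simp_all
  | succ k ih =>
      intro i h; simp only [pvLast] at h; split at h
      · simp_all
      · obtain ⟨h1, h2⟩ := ih h; exact ⟨h1, by omega⟩

theorem pvLast_exists {f : Nat → Int} {v : Int} {i k : Nat}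
    (h1 : f i = v) (h2 : i ≤ k) : ∃ i', pvLast f v k = some i' ∧ i ≤ i' := by
  induction k with
  | zero =>
      have : i = 0 := by omega
      subst this
      exact ⟨0, by simp [pvLast, h1], le_refl _⟩
  | succ k ih =>
      by_cases hl : f (k + 1) = v
      · exact ⟨k + 1, by simp [pvLast, hl], by omega⟩
      · have hik : i ≤ k := by
          rcases Nat.lt_or_ge i (k + 1) with h | h
          · omega
          · exfalso; have : i = k + 1 := by omega
            subst this; exact hl h1
        obtain ⟨i', hi', hle⟩ := ih hik
        exact ⟨i', by simp [pvLast, hl, hi'], hle⟩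

-- A's inner loop: the running pair of sums is the pair of segment sums,
-- and the min accumulator follows the prefix-sum condition.
theorem pv_innerA (a b : List Int) (i : Nat) (c : Nat) (acc : Int) :
    (List.range c).foldl
        (fun (s : Int × Int × Int) t =>
          (if s.2.1 + a.getD (i + t) 0 = s.2.2 + b.getD (i + t) 0 then
              (if (t : Int) + 1 < s.1 then (t : Int) + 1 else s.1)
            else s.1,
           s.2.1 + a.getD (i + t) 0, s.2.2 + b.getD (i + t) 0))
        (acc, 0, 0)
      = ((List.range c).foldl
          (fun acc t =>
            if pvPfx a b (i + t + 1) = pvPfx a b i then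
              (if (t : Int) + 1 < acc then (t : Int) + 1 else acc)
            else acc) acc,
         pvSeg a i c, pvSeg b i c) := by
  induction c with
  | zero => simp [pvSeg]
  | succ c ih =>
      rw [List.range_succ, List.foldl_append, List.foldl_append, ih]
      have hcond : (pvSeg a i c + a.getD (i + c) 0 = pvSeg b i c + b.getD (i + c) 0)
          ↔ (pvPfx a b (i + c + 1) = pvPfx a b i) := by
        have h := pvSeg_sub a b i (c + 1)
        rw [show i + (c + 1) = i + c + 1 from rfl, pvSeg_succ, pvSeg_succ] at h
        constructor <;> intro hh <;> omega
      simp only [List.foldl_cons, List.foldl_nil, pvSeg_succ]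
      rw [if_congr hcond rfl rfl]

-- B's loop invariant: the dict maps each prefix value to its last index so far,
-- p is the running prefix sum, and best follows the last-occurrence recurrence.
theorem pv_innerB (a b : List Int) (c : Nat) (n0 : Int) :
    ∃ d : PySem.Dict Int Int,
      (List.range c).foldl
          (fun (s : PySem.Dict Int Int × Int × Int) k =>
            (s.1.insert (s.2.2 + a.getD k 0 - b.getD k 0) ((k : Int) + 1),
             (match s.1.get? (s.2.2 + a.getD k 0 - b.getD k 0) with
              | some i => if (k : Int) + 1 - i < s.2.1 then (k : Int) + 1 - i else s.2.1
              | none => s.2.1),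
             s.2.2 + a.getD k 0 - b.getD k 0))
          (PySem.Dict.empty.insert 0 0, n0, 0)
        = (d,
           (List.range c).foldl
             (fun acc k =>
               match pvLast (pvPfx a b) (pvPfx a b (k + 1)) k with
               | some i => if (k : Int) + 1 - (i : Int) < acc then (k : Int) + 1 - (i : Int) else acc
               | none => acc) n0,
           pvPfx a b c)
      ∧ ∀ v, d.get? v = pvLastI (pvPfx a b) v c := by
  induction c with
  | zero =>
      refine ⟨PySem.Dict.empty.insert 0 0, rfl, ?_⟩
      intro v
      rw [PySem.Dict.get?_insert]
      simp only [pvLastI, pvLast, PySem.Dict.get?_empty,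
        show pvPfx a b 0 = 0 from rfl]
      by_cases hv : v = 0
      · simp [hv]
      · rw [if_neg hv, if_neg (show ¬((0 : Int) = v) from fun h => hv h.symm)]
  | succ c ih =>
      obtain ⟨d, hfold, hget⟩ := ih
      rw [List.range_succ, List.foldl_append, List.foldl_append, hfold]
      simp only [List.foldl_cons, List.foldl_nil]
      rw [show pvPfx a b c + a.getD c 0 - b.getD c 0 = pvPfx a b (c + 1) from rfl]
      rw [hget (pvPfx a b (c + 1))]
      refine ⟨d.insert (pvPfx a b (c + 1)) ((c : Int) + 1), ?_, ?_⟩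
      · cases h : pvLast (pvPfx a b) (pvPfx a b (c + 1)) c <;> simp [pvLastI, h]
      · intro v
        rw [PySem.Dict.get?_insert]
        simp only [pvLastI, pvLast]
        by_cases hv : v = pvPfx a b (c + 1)
        · simp [hv, Nat.cast_add]
        · have hne : ¬ (pvPfx a b (c + 1) = v) := fun h => hv h.symm
          simp only [hv, hne, if_false]
          simpa [pvLastI] using hget v

-- Port A equals the fold of min over pvCandA.
theorem pv_portA (a b : List Int) (m : Nat) :
    smallestCommonSum a b (m : Int) = (pvCandA a b m).foldl min (m : Int) := by
  unfold smallestCommonSum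
  rw [PySem.List.pyRange_zero_natCast, List.foldl_map]
  simp only [pvCandA]
  rw [← pv_foldl_min_flatMap]
  refine PySem.List.foldl_congr_mem' _ _ _ _ ?_
  intro i _ acc
  rw [PySem.List.pyRange_one, List.foldl_map]
  rw [show (((m : Nat) : Int) - ((i : Nat) : Int)).toNat = m - i by omega]
  have h1 := PySem.List.foldl_congr_mem' (List.range (m - i))
      (fun (s : Int × Int × Int) (t : Nat) =>
        (if s.2.1 + PySem.List.pyGetD a ((i : Int) + (t : Int)) 0
              = s.2.2 + PySem.List.pyGetD b ((i : Int) + (t : Int)) 0 then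
            (if (i : Int) + (t : Int) - (i : Int) + 1 < s.1 then
                (i : Int) + (t : Int) - (i : Int) + 1
              else s.1)
          else s.1,
         s.2.1 + PySem.List.pyGetD a ((i : Int) + (t : Int)) 0,
         s.2.2 + PySem.List.pyGetD b ((i : Int) + (t : Int)) 0))
      (fun (s : Int × Int × Int) (t : Nat) =>
        (if s.2.1 + a.getD (i + t) 0 = s.2.2 + b.getD (i + t) 0 then
            (if (t : Int) + 1 < s.1 then (t : Int) + 1 else s.1)
          else s.1,
         s.2.1 + a.getD (i + t) 0, s.2.2 + b.getD (i + t) 0))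
      (acc, 0, 0)
      (by
        intro t _ s
        beta_reduce
        rw [show (i : Int) + (t : Int) = ((i + t : Nat) : Int) by push_cast; ring,
          PySem.List.pyGetD_natCast, PySem.List.pyGetD_natCast,
          show ((i + t : Nat) : Int) - (i : Int) + 1 = (t : Int) + 1 by push_cast; ring])
  refine Eq.trans (congrArg Prod.fst (h1.trans (pv_innerA a b i (m - i) acc))) ?_
  rw [List.foldl_map,
    ← PySem.List.foldl_ite_eq_foldl_filter
        (fun t => pvPfx a b (i + t + 1) = pvPfx a b i)
        (fun (acc : Int) (t : Nat) => min acc ((t : Int) + 1)) (List.range (m - i)) acc]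
  refine PySem.List.foldl_congr_mem' _ _ _ _ ?_
  intro t _ acc'
  by_cases hc : pvPfx a b (i + t + 1) = pvPfx a b i <;> simp [hc, pv_if_lt]

-- Port B equals the fold of min over pvCandB.
theorem pv_portB (a b : List Int) (m : Nat) :
    smallestCommonSum_alt a b (m : Int) = (pvCandB a b m).foldl min (m : Int) := by
  unfold smallestCommonSum_alt
  rw [PySem.List.pyRange_zero_natCast, List.foldl_map]
  have hstep := PySem.List.foldl_congr_mem' (List.range m)
      (fun (s : PySem.Dict Int Int × Int × Int) (k : Nat) =>
        (s.1.insert (s.2.2 + PySem.List.pyGetD a ((k : Nat) : Int) 0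
            - PySem.List.pyGetD b ((k : Nat) : Int) 0) ((k : Int) + 1),
         (match s.1.get? (s.2.2 + PySem.List.pyGetD a ((k : Nat) : Int) 0
            - PySem.List.pyGetD b ((k : Nat) : Int) 0) with
          | some i => if (k : Int) + 1 - i < s.2.1 then (k : Int) + 1 - i else s.2.1
          | none => s.2.1),
         s.2.2 + PySem.List.pyGetD a ((k : Nat) : Int) 0
            - PySem.List.pyGetD b ((k : Nat) : Int) 0))
      (fun (s : PySem.Dict Int Int × Int × Int) (k : Nat) =>
        (s.1.insert (s.2.2 + a.getD k 0 - b.getD k 0) ((k : Int) + 1),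
         (match s.1.get? (s.2.2 + a.getD k 0 - b.getD k 0) with
          | some i => if (k : Int) + 1 - i < s.2.1 then (k : Int) + 1 - i else s.2.1
          | none => s.2.1),
         s.2.2 + a.getD k 0 - b.getD k 0))
      (PySem.Dict.empty.insert 0 0, ((m : Nat) : Int), 0)
      (by intro k _ s; simp only [PySem.List.pyGetD_natCast])
  obtain ⟨d, hfold, -⟩ := pv_innerB a b m ((m : Nat) : Int)
  refine Eq.trans (congrArg (fun z => z.2.1) (hstep.trans hfold)) ?_
  simp only [pvCandB]
  rw [← pv_foldl_min_filterMap]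
  refine PySem.List.foldl_congr_mem' _ _ _ _ ?_
  intro k _ acc
  cases h : pvLast (pvPfx a b) (pvPfx a b (k + 1)) k <;> simp [h, pv_if_lt]

theorem pv_min_eq {L1 L2 : List Int} (init : Int)
    (h1 : ∀ x ∈ L2, x ∈ L1) (h2 : ∀ x ∈ L1, ∃ y ∈ L2, y ≤ x) :
    L1.foldl min init = L2.foldl min init := by
  apply le_antisymm
  · rcases PySem.List.foldl_min_mem L2 init with h | h
    · rw [h]; exact (PySem.List.foldl_min_le L1 init).1
    · exact (PySem.List.foldl_min_le L1 init).2 _ (h1 _ h)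
  · rcases PySem.List.foldl_min_mem L1 init with h | h
    · rw [h]; exact (PySem.List.foldl_min_le L2 init).1
    · obtain ⟨y, hy, hle⟩ := h2 _ h
      exact le_trans ((PySem.List.foldl_min_le L2 init).2 _ hy) hle

theorem pv_mem_candA {a b : List Int} {m : Nat} {x : Int} :
    x ∈ pvCandA a b m ↔
      ∃ i t, i < m ∧ t < m - i ∧ pvPfx a b (i + t + 1) = pvPfx a b i ∧ x = (t : Int) + 1 := by
  simp only [pvCandA, List.mem_flatMap, List.mem_map, List.mem_filter, List.mem_range,
    decide_eq_true_eq]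
  constructor
  · rintro ⟨i, hi, t, ⟨⟨ht, hcond⟩, hx⟩⟩
    exact ⟨i, t, hi, ht, hcond, hx.symm⟩
  · rintro ⟨i, t, hi, ht, hcond, hx⟩
    exact ⟨i, hi, t, ⟨⟨ht, hcond⟩, hx.symm⟩⟩

theorem pv_mem_candB {a b : List Int} {m : Nat} {x : Int} :
    x ∈ pvCandB a b m ↔
      ∃ k, k < m ∧ ∃ i, pvLast (pvPfx a b) (pvPfx a b (k + 1)) k = some i
        ∧ x = (k : Int) + 1 - (i : Int) := by
  simp only [pvCandB, List.mem_filterMap, List.mem_range]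
  constructor
  · rintro ⟨k, hk, hf⟩
    refine ⟨k, hk, ?_⟩
    rcases h : pvLast (pvPfx a b) (pvPfx a b (k + 1)) k with _ | i
    · rw [h] at hf; simp at hf
    · rw [h] at hf; simp at hf
      exact ⟨i, rfl, hf.symm⟩
  · rintro ⟨k, hk, i, hsome, hx⟩
    refine ⟨k, hk, ?_⟩
    rw [hsome, hx]

theorem pv_cand_sub {a b : List Int} {m : Nat} :
    ∀ x ∈ pvCandB a b m, x ∈ pvCandA a b m := by
  intro x hx
  rw [pv_mem_candB] at hx
  obtain ⟨k, hk, i, hsome, hx⟩ := hx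
  obtain ⟨hfi, hik⟩ := pvLast_some hsome
  rw [pv_mem_candA]
  refine ⟨i, k - i, by omega, by omega, ?_, ?_⟩
  · rw [show i + (k - i) + 1 = k + 1 by omega]
    exact hfi.symm
  · have : ((k - i : Nat) : Int) = (k : Int) - (i : Int) := by omega
    omega

theorem pv_cand_dom {a b : List Int} {m : Nat} :
    ∀ x ∈ pvCandA a b m, ∃ y ∈ pvCandB a b m, y ≤ x := by
  intro x hx
  rw [pv_mem_candA] at hx
  obtain ⟨i, t, hi, ht, hcond, hx⟩ := hx
  obtain ⟨i', hsome, hle⟩ := pvLast_exists (f := pvPfx a b)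
    (v := pvPfx a b (i + t + 1)) (i := i) (k := i + t) hcond.symm (by omega)
  have hi'le := (pvLast_some hsome).2
  refine ⟨((i + t : Nat) : Int) + 1 - (i' : Int), ?_, ?_⟩
  · rw [pv_mem_candB]
    exact ⟨i + t, by omega, i', hsome, rfl⟩
  · push_cast
    omega

-- ===== VERDICT (by name: the statement is the Claim_ definition above) =====
theorem smallestCommonSum_spec : Claim_equal_smallestCommonSum := by
  intro arr1 arr2 n _ _
  unfold Spec_smallestCommonSum
  by_cases hn : 0 ≤ n
  · have hm : n = ((n.toNat : Nat) : Int) := (Int.toNat_of_nonneg hn).symm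
    rw [hm, pv_portA, pv_portB]
    exact pv_min_eq _ pv_cand_sub pv_cand_dom
  · have hnil : PySem.List.pyRange 0 n 1 = [] :=
      PySem.List.pyRange_one_eq_nil (by omega)
    simp [smallestCommonSum, smallestCommonSum_alt, hnil]
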